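-- pv_equiv track=rewrite | github.com/jskim7018/leetcode_study | algorithm_study/2026/02/20260214/hard/LC_2509.py | cycleLengthQueries
-- ===== SOURCE A (Python) =====
-- from typing import List
--
-- def cycleLengthQueries(n: int, queries: List[List[int]]) -> List[int]:
--     # 각, query마다 연결된 것들의 LCA 거리 구하는 문제
--     # 즉, LCA 문제라고 볼 수 있음.
--     # LCA 구하는 것은 n 이기에 시간 복잡도는 O(n*m)
--     # 보는 나누기 2 floor로 구하면 됨.
--
--     def lca_total_distance(node1: int, node2: int) -> int:
--         node1_ancestors = []
--         node2_ancestors = []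
--         while node1 > 0:
--             node1_ancestors.append(node1)
--             node1 //= 2
--         while node2 > 0:
--             node2_ancestors.append(node2)
--             node2 //= 2
--
--         n1_idx = 0
--         n2_idx = 0
--
--         while (node1_ancestors[n1_idx]
--                != node2_ancestors[n2_idx]):
--             if node1_ancestors[n1_idx] > node2_ancestors[n2_idx]:
--                 n1_idx += 1
--             elif node1_ancestors[n1_idx] < node2_ancestors[n2_idx]:
--                 n2_idx += 1
--             else:
--                 break
--         return n1_idx + n2_idx
--
--     ans = []
--     for q in queries:
--         ans.append(lca_total_distance(q[0], q[1]) + 1)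
--
--     return ans
-- ===== SOURCE B (Python) =====
-- from typing import List
--
-- def cycleLengthQueries(n: int, queries: List[List[int]]) -> List[int]:
--     def dist(a: int, b: int) -> int:
--         if a == b:
--             return 0
--         if a > b:
--             return 1 + dist(a // 2, b)
--         return 1 + dist(a, b // 2)
--     return [dist(q[0], q[1]) + 1 for q in queries]
-- ===== Notes on version B (the rewrite author's own statement) =====
-- stated objective: simpler
-- what changed: Replaces the two materialized ancestor lists and the index-walk over them with a direct recursive halving of the two node values themselves, counting steps until they meet; no lists are built.
import Mathlib
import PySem

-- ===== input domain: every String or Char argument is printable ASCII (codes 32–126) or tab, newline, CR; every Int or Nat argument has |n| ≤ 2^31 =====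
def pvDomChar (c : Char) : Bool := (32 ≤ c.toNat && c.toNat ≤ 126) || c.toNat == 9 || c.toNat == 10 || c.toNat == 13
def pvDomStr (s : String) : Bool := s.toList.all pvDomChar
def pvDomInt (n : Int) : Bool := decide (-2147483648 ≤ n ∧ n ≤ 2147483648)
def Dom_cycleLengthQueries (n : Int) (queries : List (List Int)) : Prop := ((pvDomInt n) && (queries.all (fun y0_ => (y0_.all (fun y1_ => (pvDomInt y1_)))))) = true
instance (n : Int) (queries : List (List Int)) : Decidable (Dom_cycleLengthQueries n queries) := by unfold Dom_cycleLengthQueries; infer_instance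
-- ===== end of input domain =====

-- ===== PORT A =====
-- B replaces A's materialized ancestor lists + index walk by halving the two node
-- values directly (simpler, no allocations); return values proved equal on Pre_.

-- while node > 0: append node; node //= 2   (list built in the same order)
def buildAnc (node : Int) : List Int :=
  if h : node > 0 then node :: buildAnc (PySem.Int.floordiv node 2) else []
termination_by node.toNat
decreasing_by
  have := PySem.Int.floordiv_eq_ediv_of_pos (a := node) (b := 2) (by omega)
  omega

-- the index walk: while ancestors differ, advance the index of the larger side.
-- pyGet? = none is Python's IndexError (empty ancestor list); excluded by Pre_,
-- the fallback branch merely totalizes the function.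
def walkA (L1 L2 : List Int) (i1 i2 : Nat) : Int :=
  match h1 : PySem.List.pyGet? L1 (i1 : Int), h2 : PySem.List.pyGet? L2 (i2 : Int) with
  | some a, some b =>
      if a ≠ b then
        if a > b then walkA L1 L2 (i1 + 1) i2
        else if a < b then walkA L1 L2 i1 (i2 + 1)
        else (i1 : Int) + (i2 : Int)          -- Python's unreachable 'else: break'
      else (i1 : Int) + (i2 : Int)
  | _, _ => (i1 : Int) + (i2 : Int)           -- IndexError fallback (outside Pre_)
  termination_by (L1.length - i1) + (L2.length - i2)
  decreasing_by
  · have h1' : L1[i1]? = some a := by rwa [PySem.List.pyGet?_natCast] at h1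
    have : i1 < L1.length := (List.getElem?_eq_some_iff.mp h1').1
    omega
  · have h2' : L2[i2]? = some b := by rwa [PySem.List.pyGet?_natCast] at h2
    have : i2 < L2.length := (List.getElem?_eq_some_iff.mp h2').1
    omega

def lcaTotalDistance (node1 node2 : Int) : Int :=
  walkA (buildAnc node1) (buildAnc node2) 0 0

def cycleLengthQueries (n : Int) (queries : List (List Int)) : List Int :=
  queries.map (fun q =>
    lcaTotalDistance ((PySem.List.pyGet? q 0).getD 0) ((PySem.List.pyGet? q 1).getD 0) + 1)

-- ===== PORT B =====
-- dist: halve the larger node until the two meet, counting steps.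
def distB (a b : Int) : Int :=
  if h : a < 0 ∨ b < 0 then 0                -- totality guard only (Python B recurses forever on negatives)
  else if a = b then 0
  else if a > b then 1 + distB (PySem.Int.floordiv a 2) b
  else 1 + distB a (PySem.Int.floordiv b 2)
termination_by a.toNat + b.toNat
decreasing_by
  · have := PySem.Int.floordiv_eq_ediv_of_pos (a := a) (b := 2) (by omega)
    omega
  · have := PySem.Int.floordiv_eq_ediv_of_pos (a := b) (b := 2) (by omega)
    omega

def cycleLengthQueries_alt (n : Int) (queries : List (List Int)) : List Int :=
  queries.map (fun q =>
    distB ((PySem.List.pyGet? q 0).getD 0) ((PySem.List.pyGet? q 1).getD 0) + 1)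

-- ===== PRECONDITION & SPEC =====
-- Pre_ admits exactly the inputs where A returns: each query supplies two node
-- values ≥ 1 (otherwise A hits IndexError on a short query or an empty ancestor list).
def Pre_cycleLengthQueries (n : Int) (queries : List (List Int)) : Prop :=
  ∀ q ∈ queries, 1 ≤ (PySem.List.pyGet? q 0).getD 0 ∧ 1 ≤ (PySem.List.pyGet? q 1).getD 0

instance (n : Int) (queries : List (List Int)) : Decidable (Pre_cycleLengthQueries n queries) := by
  unfold Pre_cycleLengthQueries; infer_instance

def pvWitness_cycleLengthQueries : Int × List (List Int) := (3, [[5, 3], [4, 7], [1, 1]])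

def Spec_cycleLengthQueries (n : Int) (queries : List (List Int)) (out : List Int) : Prop := out = cycleLengthQueries_alt n queries
instance (n : Int) (queries : List (List Int)) (out : List Int) : Decidable (Spec_cycleLengthQueries n queries out) := by unfold Spec_cycleLengthQueries; infer_instance

-- ===== CLAIM (what is proved, stated in full; the proofs are below) =====
def Claim_equal_cycleLengthQueries : Prop := ∀ (n : Int) (queries : List (List Int)), Dom_cycleLengthQueries n queries → Pre_cycleLengthQueries n queries → Spec_cycleLengthQueries n queries (cycleLengthQueries n queries)

-- ===== LEMMAS AND PROOFS =====

lemma buildAnc_pos (a : Int) (ha : 0 < a) :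
    buildAnc a = a :: buildAnc (PySem.Int.floordiv a 2) := by
  rw [buildAnc]; simp [ha]

lemma distB_eq (a b : Int) (ha : 1 ≤ a) (hb : 1 ≤ b) :
    distB a b = if a = b then 0
      else if a > b then 1 + distB (PySem.Int.floordiv a 2) b
      else 1 + distB a (PySem.Int.floordiv b 2) := by
  rw [distB]; have : ¬ (a < 0 ∨ b < 0) := by omega
  simp [this]

-- the index walk over the two ancestor lists computes i1 + i2 + (direct halving count)
lemma walk_eq : ∀ (k : Nat) (a b : Int) (L1 L2 : List Int) (i1 i2 : Nat),
    a.toNat + b.toNat ≤ k → 1 ≤ a → 1 ≤ b →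
    L1.drop i1 = buildAnc a → L2.drop i2 = buildAnc b →
    walkA L1 L2 i1 i2 = (i1 : Int) + (i2 : Int) + distB a b := by
  intro k
  induction k with
  | zero => intro a b _ _ _ _ hk ha hb _ _; omega
  | succ k ih =>
    intro a b L1 L2 i1 i2 hk ha hb h1 h2
    have ga1 : L1[i1]? = some a := by
      have := List.getElem?_drop (xs := L1) (i := i1) (j := 0)
      rw [h1, buildAnc_pos a (by omega)] at this
      simpa using this.symm
    have gb1 : L2[i2]? = some b := by
      have := List.getElem?_drop (xs := L2) (i := i2) (j := 0)
      rw [h2, buildAnc_pos b (by omega)] at this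
      simpa using this.symm
    have ga : PySem.List.pyGet? L1 (i1 : Int) = some a := by
      rw [PySem.List.pyGet?_natCast]; exact ga1
    have gb : PySem.List.pyGet? L2 (i2 : Int) = some b := by
      rw [PySem.List.pyGet?_natCast]; exact gb1
    rw [walkA, ga, gb]
    by_cases hab : a = b
    · simp [hab, distB_eq b b hb hb]
    · have hfa := PySem.Int.floordiv_eq_ediv_of_pos (a := a) (b := 2) (by omega)
      have hfb := PySem.Int.floordiv_eq_ediv_of_pos (a := b) (b := 2) (by omega)
      by_cases hgt : a > b
      · have hdrop : L1.drop (i1 + 1) = buildAnc (PySem.Int.floordiv a 2) := by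
          rw [← List.tail_drop, h1, buildAnc_pos a (by omega), List.tail_cons]
        have := ih (PySem.Int.floordiv a 2) b L1 L2 (i1 + 1) i2
          (by omega) (by omega) hb hdrop h2
        rw [distB_eq a b ha hb]
        simp only [hab, hgt, if_true, if_false, ne_eq, not_false_iff]
        rw [this]; push_cast; ring
      · have hlt : a < b := by omega
        have hdrop : L2.drop (i2 + 1) = buildAnc (PySem.Int.floordiv b 2) := by
          rw [← List.tail_drop, h2, buildAnc_pos b (by omega), List.tail_cons]
        have := ih a (PySem.Int.floordiv b 2) L1 L2 i1 (i2 + 1)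
          (by omega) ha (by omega) h1 hdrop
        rw [distB_eq a b ha hb]
        simp only [hab, hgt, hlt, if_true, if_false, ne_eq, not_false_iff]
        rw [this]; push_cast; ring

lemma lca_eq_distB (a b : Int) (ha : 1 ≤ a) (hb : 1 ≤ b) :
    lcaTotalDistance a b = distB a b := by
  have := walk_eq (a.toNat + b.toNat) a b (buildAnc a) (buildAnc b) 0 0
    (le_refl _) ha hb (by simp) (by simp)
  simpa [lcaTotalDistance] using this

-- ===== VERDICT (by name: the statement is the Claim_ definition above) =====
theorem cycleLengthQueries_spec : Claim_equal_cycleLengthQueries := by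
  intro n queries _ hpre
  unfold Spec_cycleLengthQueries cycleLengthQueries cycleLengthQueries_alt
  apply List.map_congr_left
  intro q hq
  obtain ⟨h0, h1⟩ := hpre q hq
  rw [lca_eq_distB _ _ h0 h1]
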